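-- pv_equiv track=rewrite | github.com/React95/R95-fonts | scripts/preview.py | _make_tofu_matrix
-- ===== SOURCE A (Python) =====
-- def _make_tofu_matrix(height: int, width: int) -> list[list[int]]:
--     margin_v = max(1, height // 5)
--     margin_h = max(1, width // 5)
--     return [
--         [1 if (margin_v <= r < height - margin_v and margin_h <= c < width - margin_h) else 0
--          for c in range(width)]
--         for r in range(height)
--     ]
-- ===== SOURCE B (Python) =====
-- def _make_tofu_matrix(height: int, width: int) -> list[list[int]]:
--     if height <= 0:
--         return []
--     margin_v = max(1, height // 5)
--     margin_h = max(1, width // 5)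
--     inner = width - 2 * margin_h
--     if inner > 0:
--         inside_row = [0] * margin_h + [1] * inner + [0] * margin_h
--     else:
--         inside_row = [0] * width
--     zero_row = [0] * width
--     return [list(inside_row) if margin_v <= r < height - margin_v else list(zero_row)
--             for r in range(height)]
-- ===== Notes on version B (the rewrite author's own statement) =====
-- stated objective: alternative
-- what changed: Replaces the per-cell conditional comprehension with row-level block construction: one inside row and one zero row are built once by list-repetition concatenation, and each output row is selected (and copied) per row index.
import Mathlib
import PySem

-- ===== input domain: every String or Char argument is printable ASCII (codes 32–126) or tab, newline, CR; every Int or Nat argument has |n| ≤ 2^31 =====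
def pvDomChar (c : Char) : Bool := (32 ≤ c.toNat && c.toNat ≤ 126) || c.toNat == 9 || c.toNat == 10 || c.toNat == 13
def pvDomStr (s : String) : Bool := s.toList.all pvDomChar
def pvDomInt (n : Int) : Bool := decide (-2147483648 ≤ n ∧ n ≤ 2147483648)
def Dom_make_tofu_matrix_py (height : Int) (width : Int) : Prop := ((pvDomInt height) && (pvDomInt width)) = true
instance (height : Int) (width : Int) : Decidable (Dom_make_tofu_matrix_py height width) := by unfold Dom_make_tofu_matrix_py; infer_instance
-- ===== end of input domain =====

-- B builds each row by block concatenation (margin zeros / inner ones / margin zeros) and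
-- selects a precomputed row per row index, instead of A's per-cell conditional; alternative decomposition, same cost.

-- ===== PORT A =====
def make_tofu_matrix_py (height : Int) (width : Int) : List (List Int) :=
  let margin_v := max 1 (PySem.Int.floordiv height 5)
  let margin_h := max 1 (PySem.Int.floordiv width 5)
  (PySem.List.pyRange 0 height 1).map (fun r =>
    (PySem.List.pyRange 0 width 1).map (fun c =>
      if margin_v ≤ r ∧ r < height - margin_v ∧ margin_h ≤ c ∧ c < width - margin_h then (1 : Int) else 0))

-- ===== PORT B =====
-- Python's '[x] * n' (empty for n ≤ 0) is List.replicate n.toNat x — exact, toNat clamps negatives to 0.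
def make_tofu_matrix_py_alt (height : Int) (width : Int) : List (List Int) :=
  if height ≤ 0 then [] else
  let margin_v := max 1 (PySem.Int.floordiv height 5)
  let margin_h := max 1 (PySem.Int.floordiv width 5)
  let inner := width - 2 * margin_h
  let inside_row : List Int :=
    if inner > 0 then
      List.replicate margin_h.toNat 0 ++ List.replicate inner.toNat 1 ++ List.replicate margin_h.toNat 0
    else
      List.replicate width.toNat 0
  let zero_row : List Int := List.replicate width.toNat 0
  (PySem.List.pyRange 0 height 1).map (fun r =>
    if margin_v ≤ r ∧ r < height - margin_v then inside_row else zero_row)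

-- ===== PRECONDITION & SPEC =====
def Spec_make_tofu_matrix_py (height : Int) (width : Int) (out : List (List Int)) : Prop := out = make_tofu_matrix_py_alt height width
instance (height : Int) (width : Int) (out : List (List Int)) : Decidable (Spec_make_tofu_matrix_py height width out) := by unfold Spec_make_tofu_matrix_py; infer_instance

-- ===== CLAIM (what is proved, stated in full; the proofs are below) =====
def Claim_equal_make_tofu_matrix_py : Prop := ∀ (height : Int) (width : Int), Dom_make_tofu_matrix_py height width → Spec_make_tofu_matrix_py height width (make_tofu_matrix_py height width)

-- ===== LEMMAS AND PROOFS =====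

-- A's per-cell row equals B's block-built row (mh ≥ 1 always holds for the computed margin).
theorem tofu_row_eq (w mh : Int) (hmh : 1 ≤ mh) :
    (PySem.List.pyRange 0 w 1).map (fun c => if mh ≤ c ∧ c < w - mh then (1 : Int) else 0)
    = if w - 2 * mh > 0 then
        List.replicate mh.toNat 0 ++ List.replicate (w - 2 * mh).toNat 1 ++ List.replicate mh.toNat 0
      else
        List.replicate w.toNat 0 := by
  split_ifs with hw
  · apply List.ext_getElem
    · simp only [List.length_map, PySem.List.length_pyRange_one, List.length_append,
        List.length_replicate]
      omega
    · intro i h1 h2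
      have hlen : i < (w - 0).toNat := by
        simpa [PySem.List.length_pyRange_one] using h1
      simp only [List.getElem_map, PySem.List.getElem_pyRange_one, List.getElem_append,
        List.length_append, List.length_replicate, List.getElem_replicate]
      split_ifs <;> omega
  · apply List.ext_getElem
    · simp [PySem.List.length_pyRange_one]
    · intro i h1 h2
      have hlen : i < (w - 0).toNat := by
        simpa [PySem.List.length_pyRange_one] using h1
      simp only [List.getElem_map, PySem.List.getElem_pyRange_one, List.getElem_replicate]
      rw [if_neg (by omega)]

-- ===== VERDICT (by name: the statement is the Claim_ definition above) =====
theorem make_tofu_matrix_py_spec : Claim_equal_make_tofu_matrix_py := by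
  intro height width _
  unfold Spec_make_tofu_matrix_py make_tofu_matrix_py make_tofu_matrix_py_alt
  by_cases hh : height ≤ 0
  · rw [if_pos hh, PySem.List.pyRange_one_eq_nil hh, List.map_nil]
  rw [if_neg hh]
  apply List.map_congr_left
  intro r _
  by_cases hrow : max 1 (PySem.Int.floordiv height 5) ≤ r ∧
      r < height - max 1 (PySem.Int.floordiv height 5)
  · rw [if_pos hrow]
    have hfn : (fun c => if max 1 (PySem.Int.floordiv height 5) ≤ r ∧
          r < height - max 1 (PySem.Int.floordiv height 5) ∧
          max 1 (PySem.Int.floordiv width 5) ≤ c ∧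
          c < width - max 1 (PySem.Int.floordiv width 5) then (1 : Int) else 0)
        = (fun c => if max 1 (PySem.Int.floordiv width 5) ≤ c ∧
          c < width - max 1 (PySem.Int.floordiv width 5) then (1 : Int) else 0) :=
      funext fun c => by simp only [eq_true hrow.1, eq_true hrow.2, true_and]
    rw [hfn, tofu_row_eq width (max 1 (PySem.Int.floordiv width 5)) (le_max_left 1 _)]
  · rw [if_neg hrow]
    apply List.ext_getElem
    · simp [PySem.List.length_pyRange_one]
    · intro i h1 h2
      simp only [List.getElem_map, PySem.List.getElem_pyRange_one, List.getElem_replicate]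
      rw [if_neg (fun h => hrow ⟨h.1, h.2.1⟩)]
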